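/- GENERATED by c/gen_decode.py: decode facts of the image, one per distinct instruction byte string. -/
import UserX.DecodeImage

#decode_all Gif.Dec
  "0f833affffff"  -- jae 108f4e
  "0f843d010000"  -- je 109db0
  "0f848e000000"  -- je 107c48
  "0f84d6000000"  -- je 1090ce
  "0f8585010000"  -- jne 10a942
  "0f8df7000000"  -- jge 107080
  "0f8fea040000"  -- jg 107098
  "0f9ec2"  -- setle dl
  "0fb644240f"  -- movzx eax,BYTE PTR [rsp+0xf]
  "0fb66d00"  -- movzx ebp,BYTE PTR [rbp+0x0]
  "39c2"  -- cmp edx,eax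
  "3c3b"  -- cmp al,0x3b
  "4084ed"  -- test bpl,bpl
  "410fb6ef"  -- movzx ebp,r15b
  "4183c501"  -- add r13d,0x1
  "4183e601"  -- and r14d,0x1
  "41892f"  -- mov DWORD PTR [r15],ebp
  "4189c4"  -- mov r12d,eax
  "418b1e"  -- mov ebx,DWORD PTR [r14]
  "418b4614"  -- mov eax,DWORD PTR [r14+0x14]
  "418b74240c"  -- mov esi,DWORD PTR [r12+0xc]
  "41be00000000"  -- mov r14d,0x0
  "41c7042400000000"  -- mov DWORD PTR [r12],0x0
  "41c7450004000000"  -- mov DWORD PTR [r13+0x0],0x4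
  "41c784240000c000f1f1f1f1"  -- mov DWORD PTR [r12+0xc00000],0xf1f1f1f1
  "41c7850400c00001f3f3f3"  -- mov DWORD PTR [r13+0xc00004],0xf3f3f301
  "440fb6642420"  -- movzx r12d,BYTE PTR [rsp+0x20]
  "440fb67c2422"  -- movzx r15d,BYTE PTR [rsp+0x22]
  "44887338"  -- mov BYTE PTR [rbx+0x38],r14b
  "4489730c"  -- mov DWORD PTR [rbx+0xc],r14d
  "4489e2"  -- mov edx,r12d
  "4489f0"  -- mov eax,r14d
  "448b2c9d40131400"  -- mov r13d,DWORD PTR [rbx*4+0x141340]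
  "448b7504"  -- mov r14d,DWORD PTR [rbp+0x4]
  "448d7b01"  -- lea r15d,[rbx+0x1]
  "453b7500"  -- cmp r14d,DWORD PTR [r13+0x0]
  "4588742402"  -- mov BYTE PTR [r12+0x2],r14b
  "45896618"  -- mov DWORD PTR [r14+0x18],r12d
  "458b7500"  -- mov r14d,DWORD PTR [r13+0x0]
  "480fafe8"  -- imul rbp,rax
  "4839d0"  -- cmp rax,rdx
  "4863db"  -- movsxd rbx,ebx
  "4881ec98000000"  -- sub rsp,0x98
  "4883c448"  -- add rsp,0x48
  "4883ec58"  -- sub rsp,0x58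
  "4889442418"  -- mov QWORD PTR [rsp+0x18],rax
  "48897c2420"  -- mov QWORD PTR [rsp+0x20],rdi
  "4889ea"  -- mov rdx,rbp
  "488b4c2410"  -- mov rcx,QWORD PTR [rsp+0x10]
  "488b6b30"  -- mov rbp,QWORD PTR [rbx+0x30]
  "488b7508"  -- mov rsi,QWORD PTR [rbp+0x8]
  "488b7c2420"  -- mov rdi,QWORD PTR [rsp+0x20]
  "488d2cc500000000"  -- lea rbp,[rax*8+0x0]
  "488d5c01fe"  -- lea rbx,[rcx+rax*1-0x2]
  "488d732c"  -- lea rsi,[rbx+0x2c]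
  "488d7558"  -- lea rsi,[rbp+0x58]
  "488d7b14"  -- lea rdi,[rbx+0x14]
  "488d7b34"  -- lea rdi,[rbx+0x34]
  "488d7c2440"  -- lea rdi,[rsp+0x40]
  "488d7d40"  -- lea rdi,[rbp+0x40]
  "488d7f58"  -- lea rdi,[rdi+0x58]
  "48c1e303"  -- shl rbx,0x3
  "48c7433800000000"  -- mov QWORD PTR [rbx+0x38],0x0
  "48c744240860171400"  -- mov QWORD PTR [rsp+0x8],0x141760
  "48c744241020601000"  -- mov QWORD PTR [rsp+0x10],0x106020
  "48c7442410a0671000"  -- mov QWORD PTR [rsp+0x10],0x1067a0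
  "48c7442420409f1000"  -- mov QWORD PTR [rsp+0x20],0x109f40
  "48c7454800000000"  -- mov QWORD PTR [rbp+0x48],0x0
  "49034710"  -- add rax,QWORD PTR [r15+0x10]
  "4963c6"  -- movsxd rax,r14d
  "49837e3800"  -- cmp QWORD PTR [r14+0x38],0x0
  "4989c6"  -- mov r14,rax
  "4989f6"  -- mov r14,rsi
  "498d04c4"  -- lea rax,[r12+rax*8]
  "498d7c2402"  -- lea rdi,[r12+0x2]
  "498d7c2420"  -- lea rdi,[r12+0x20]
  "498d7c2458"  -- lea rdi,[r12+0x58]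
  "498d7e0c"  -- lea rdi,[r14+0xc]
  "498d7e58"  -- lea rdi,[r14+0x58]
  "49c744243000000000"  -- mov QWORD PTR [r12+0x30],0x0
  "4b8d147f"  -- lea rdx,[r15+r15*2]
  "4c636b30"  -- movsxd r13,DWORD PTR [rbx+0x30]
  "4c897310"  -- mov QWORD PTR [rbx+0x10],r14
  "4c89f2"  -- mov rdx,r14
  "4c8b6330"  -- mov r12,QWORD PTR [rbx+0x30]
  "4c8b6d00"  -- mov r13,QWORD PTR [rbp+0x0]
  "4c8b7b70"  -- mov r15,QWORD PTR [rbx+0x70]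
  "4c8d6318"  -- lea r12,[rbx+0x18]
  "4d39ec"  -- cmp r12,r13
  "4d89e0"  -- mov r8,r12
  "7203"  -- jb 105cb0
  "740f"  -- je 109d90
  "7432"  -- je 108c79
  "7447"  -- je 106874
  "7460"  -- je 106da7
  "74a9"  -- je 105689
  "750d"  -- jne 10a25f
  "752d"  -- jne 108e95
  "75b9"  -- jne 106ede
  "7d5e"  -- jge 1056f0
  "7edc"  -- jle 106c63
  "7f57"  -- jg 10685e
  "81fbff0f0000"  -- cmp ebx,0xfff
  "83c501"  -- add ebp,0x1
  "83f806"  -- cmp eax,0x6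
  "884301"  -- mov BYTE PTR [rbx+0x1],al
  "89442414"  -- mov DWORD PTR [rsp+0x14],eax
  "896b18"  -- mov DWORD PTR [rbx+0x18],ebp
  "89d5"  -- mov ebp,edx
  "89ea"  -- mov edx,ebp
  "8b432c"  -- mov eax,DWORD PTR [rbx+0x2c]
  "8b4b2c"  -- mov ecx,DWORD PTR [rbx+0x2c]
  "8b6c2438"  -- mov ebp,DWORD PTR [rsp+0x38]
  "8d45fe"  -- lea eax,[rbp-0x2]
  "b901000000"  -- mov ecx,0x1
  "ba78000000"  -- mov edx,0x78
  "bf001f1400"  -- mov edi,0x141f00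
  "c1ee10"  -- shr esi,0x10
  "c7430400000000"  -- mov DWORD PTR [rbx+0x4],0x0
  "c7432400000000"  -- mov DWORD PTR [rbx+0x24],0x0
  "c744243000000000"  -- mov DWORD PTR [rsp+0x30],0x0
  "c7456066000000"  -- mov DWORD PTR [rbp+0x60],0x66
  "c7830000c000f1f1f1f1"  -- mov DWORD PTR [rbx+0xc00000],0xf1f1f1f1
  "d3e3"  -- shl ebx,cl
  "e80294ffff"  -- call 100300
  "e80781ffff"  -- call 1003c0
  "e80ca0ffff"  -- call 100800
  "e80ffcffff"  -- call 105480
  "e81386ffff"  -- call 100800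
  "e817f2ffff"  -- call 109a80
  "e81efeffff"  -- call 1052e0
  "e82295ffff"  -- call 1003c0
  "e826abffff"  -- call 103200
  "e829b1ffff"  -- call 100800
  "e82d7fffff"  -- call 100720
  "e8309effff"  -- call 100640
  "e832a5ffff"  -- call 100300
  "e8355affff"  -- call 1008e0
  "e8387effff"  -- call 100720
  "e83f9effff"  -- call 100640
  "e8428bffff"  -- call 100720
  "e845aeffff"  -- call 100640
  "e847afffff"  -- call 103800
  "e84aadffff"  -- call 100640
  "e85096ffff"  -- call 1003c0
  "e853c3ffff"  -- call 103b00
  "e85973ffff"  -- call 1003c0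
  "e85ebeffff"  -- call 103800
  "e86585ffff"  -- call 100640
  "e868f9ffff"  -- call 105f20
  "e86c64ffff"  -- call 100720
  "e86f9dffff"  -- call 1003c0
  "e8757affff"  -- call 100720
  "e87961ffff"  -- call 100640
  "e87e8affff"  -- call 100640
  "e885abffff"  -- call 100800
  "e88a73ffff"  -- call 100800
  "e88c77ffff"  -- call 100720
  "e89365ffff"  -- call 100800
  "e898faffff"  -- call 10a460
  "e89e64ffff"  -- call 100720
  "e8a4faffff"  -- call 1052e0
  "e8a79dffff"  -- call 100300
  "e8ad57ffff"  -- call 100720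
  "e8af72ffff"  -- call 100800
  "e8b1a1ffff"  -- call 1003c0
  "e8b663ffff"  -- call 1003c0
  "e8b980ffff"  -- call 1003c0
  "e8bc62ffff"  -- call 100800
  "e8c0adffff"  -- call 100300
  "e8c6f9ffff"  -- call 1052e0
  "e8c883ffff"  -- call 100720
  "e8cdb8ffff"  -- call 103200
  "e8d1fbffff"  -- call 107760
  "e8d878ffff"  -- call 100800
  "e8dcddffff"  -- call 107a80
  "e8dff9ffff"  -- call 1052e0
  "e8e46affff"  -- call 100800
  "e8e976ffff"  -- call 100640
  "e8ecaeffff"  -- call 1008e0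
  "e8f1feffff"  -- call 105e80
  "e8f7a0ffff"  -- call 100720
  "e8fda3ffff"  -- call 100720
  "e920ffffff"  -- jmp 10a8ed
  "e93effffff"  -- jmp 108253
  "e962feffff"  -- jmp 10949a
  "e982020000"  -- jmp 106f7d
  "e9b4feffff"  -- jmp 10949a
  "e9edfeffff"  -- jmp 108e78
  "eb46"  -- jmp 106e4b
  "eb99"  -- jmp 105689
  "ebb3"  -- jmp 106be3
  "ebcb"  -- jmp 108816
  "f7f9"  -- idiv ecx
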